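-- pv_equiv track=rewrite | github.com/Emanuel0428/Generador-Ideas-Videos | core/formatos/generador_formatos.py | _generar_explicacion_practica
-- ===== SOURCE A (Python) =====
-- def _generar_explicacion_practica(punto):
--     """Genera una explicación práctica de un punto educativo"""
--     if not punto or len(punto) < 3:
--         return "establece la base fundamental para todo lo que viene después"
--
--     palabras = punto.lower().split()
--     if any(palabra in ["inicio", "comenzar", "empezar", "primer"] for palabra in palabras):
--         return "te permite partir de una base sólida, evitando los errores comunes que comete el 90% de principiantes"
--     elif any(palabra in ["optimizar", "mejorar", "aumentar", "incrementar"] for palabra in palabras):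
--         return "puede multiplicar tus resultados actuales entre un 30% y 70% sin necesidad de herramientas costosas"
--     elif any(palabra in ["evitar", "prevenir", "reducir", "minimizar"] for palabra in palabras):
--         return "te ahorra tiempo, dinero y frustración al identificar y corregir problemas desde el principio"
--     else:
--         return "establece un diferencial competitivo que menos del 5% de personas implementa correctamente"
-- ===== SOURCE B (Python) =====
-- _PRIO = {
--     "inicio": 0, "comenzar": 0, "empezar": 0, "primer": 0,
--     "optimizar": 1, "mejorar": 1, "aumentar": 1, "incrementar": 1,
--     "evitar": 2, "prevenir": 2, "reducir": 2, "minimizar": 2,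
-- }
--
-- _RESP = [
--     "te permite partir de una base sólida, evitando los errores comunes que comete el 90% de principiantes",
--     "puede multiplicar tus resultados actuales entre un 30% y 70% sin necesidad de herramientas costosas",
--     "te ahorra tiempo, dinero y frustración al identificar y corregir problemas desde el principio",
--     "establece un diferencial competitivo que menos del 5% de personas implementa correctamente",
-- ]
--
-- def _generar_explicacion_practica(punto):
--     if not punto or len(punto) < 3:
--         return "establece la base fundamental para todo lo que viene después"
--     best = 3
--     for palabra in punto.lower().split():
--         best = min(best, _PRIO.get(palabra, 3))
--     return _RESP[best]
-- ===== Notes on version B (the rewrite author's own statement) =====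
-- stated objective: simpler
-- what changed: Replaces the chain of three any(...in list) scans over the word list with one data-driven pass: a single keyword-to-priority dict and a response table, keeping the minimum priority seen and indexing the table.
import Mathlib
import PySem

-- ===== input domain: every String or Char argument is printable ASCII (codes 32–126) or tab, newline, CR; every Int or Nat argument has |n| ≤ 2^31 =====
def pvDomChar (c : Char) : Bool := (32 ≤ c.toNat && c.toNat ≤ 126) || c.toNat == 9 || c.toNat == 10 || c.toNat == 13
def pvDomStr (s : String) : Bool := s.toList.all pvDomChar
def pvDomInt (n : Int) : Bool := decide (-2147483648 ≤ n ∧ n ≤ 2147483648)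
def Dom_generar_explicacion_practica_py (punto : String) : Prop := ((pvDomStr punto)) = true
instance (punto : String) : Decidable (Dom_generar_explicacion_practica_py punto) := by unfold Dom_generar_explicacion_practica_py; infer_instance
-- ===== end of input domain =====

-- B replaces A's three successive any(word in list) scans by a single pass keeping the
-- minimum priority from one keyword→priority dict, then indexes a response table (simpler, data-driven).

-- ===== PORT A =====
def generar_explicacion_practica_py (punto : String) : String :=
  if punto = "" ∨ PySem.Str.len punto < 3 then
    "establece la base fundamental para todo lo que viene después"
  else
    let palabras := PySem.Str.split₀ (PySem.Str.lower punto)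
    if palabras.any (fun palabra => (["inicio", "comenzar", "empezar", "primer"] : List String).contains palabra) then
      "te permite partir de una base sólida, evitando los errores comunes que comete el 90% de principiantes"
    else if palabras.any (fun palabra => (["optimizar", "mejorar", "aumentar", "incrementar"] : List String).contains palabra) then
      "puede multiplicar tus resultados actuales entre un 30% y 70% sin necesidad de herramientas costosas"
    else if palabras.any (fun palabra => (["evitar", "prevenir", "reducir", "minimizar"] : List String).contains palabra) then
      "te ahorra tiempo, dinero y frustración al identificar y corregir problemas desde el principio"
    else
      "establece un diferencial competitivo que menos del 5% de personas implementa correctamente"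

-- ===== PORT B =====
def pvPrio : PySem.Dict String Nat :=
  PySem.Dict.ofList [("inicio", 0), ("comenzar", 0), ("empezar", 0), ("primer", 0),
                     ("optimizar", 1), ("mejorar", 1), ("aumentar", 1), ("incrementar", 1),
                     ("evitar", 2), ("prevenir", 2), ("reducir", 2), ("minimizar", 2)]

def pvResp : List String :=
  ["te permite partir de una base sólida, evitando los errores comunes que comete el 90% de principiantes",
   "puede multiplicar tus resultados actuales entre un 30% y 70% sin necesidad de herramientas costosas",
   "te ahorra tiempo, dinero y frustración al identificar y corregir problemas desde el principio",
   "establece un diferencial competitivo que menos del 5% de personas implementa correctamente"]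

def generar_explicacion_practica_py_alt (punto : String) : String :=
  if punto = "" ∨ PySem.Str.len punto < 3 then
    "establece la base fundamental para todo lo que viene después"
  else
    let best := (PySem.Str.split₀ (PySem.Str.lower punto)).foldl
      (fun b palabra => min b (PySem.Dict.getD pvPrio palabra 3)) 3
    pvResp.getD best ""

-- ===== PRECONDITION & SPEC =====
def Spec_generar_explicacion_practica_py (punto : String) (out : String) : Prop := out = generar_explicacion_practica_py_alt punto
instance (punto : String) (out : String) : Decidable (Spec_generar_explicacion_practica_py punto out) := by unfold Spec_generar_explicacion_practica_py; infer_instance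

-- ===== CLAIM (what is proved, stated in full; the proofs are below) =====
def Claim_equal_generar_explicacion_practica_py : Prop := ∀ (punto : String), Dom_generar_explicacion_practica_py punto → Spec_generar_explicacion_practica_py punto (generar_explicacion_practica_py punto)

-- ===== LEMMAS AND PROOFS =====

set_option maxHeartbeats 2000000 in
lemma pvPrio_getD (w : String) :
    PySem.Dict.getD pvPrio w 3 =
      if (["inicio", "comenzar", "empezar", "primer"] : List String).contains w then 0
      else if (["optimizar", "mejorar", "aumentar", "incrementar"] : List String).contains w then 1
      else if (["evitar", "prevenir", "reducir", "minimizar"] : List String).contains w then 2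
      else 3 := by
  have h : pvPrio = PySem.Dict.mk [("inicio", 0), ("comenzar", 0), ("empezar", 0), ("primer", 0),
                     ("optimizar", 1), ("mejorar", 1), ("aumentar", 1), ("incrementar", 1),
                     ("evitar", 2), ("prevenir", 2), ("reducir", 2), ("minimizar", 2)] := by rfl
  rw [PySem.Dict.getD, h]
  simp only [PySem.Dict.get?_mk_cons, List.contains_eq_mem, List.mem_cons, List.not_mem_nil,
    or_false, beq_iff_eq, decide_eq_true_eq]
  split_ifs <;> simp_all [PySem.Dict.get?] <;> subst_vars <;> (try simp_all) <;> tauto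

lemma pv_fold_char (ws : List String) (b : Nat) (hb : b ≤ 3) :
    ws.foldl (fun a palabra => min a (PySem.Dict.getD pvPrio palabra 3)) b =
      min b (if ws.any (fun palabra => (["inicio", "comenzar", "empezar", "primer"] : List String).contains palabra) then 0
        else if ws.any (fun palabra => (["optimizar", "mejorar", "aumentar", "incrementar"] : List String).contains palabra) then 1
        else if ws.any (fun palabra => (["evitar", "prevenir", "reducir", "minimizar"] : List String).contains palabra) then 2
        else 3) := by
  induction ws generalizing b with
  | nil => simp; omega
  | cons w ws ih =>
    simp only [List.foldl_cons, List.any_cons, Bool.or_eq_true]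
    rw [ih (min b (PySem.Dict.getD pvPrio w 3)) (by omega)]
    rw [pvPrio_getD w]
    split_ifs <;> first | omega | tauto

lemma pv_main_aux (ws : List String) :
    (if ws.any (fun palabra => (["inicio", "comenzar", "empezar", "primer"] : List String).contains palabra) then
      "te permite partir de una base sólida, evitando los errores comunes que comete el 90% de principiantes"
    else if ws.any (fun palabra => (["optimizar", "mejorar", "aumentar", "incrementar"] : List String).contains palabra) then
      "puede multiplicar tus resultados actuales entre un 30% y 70% sin necesidad de herramientas costosas"
    else if ws.any (fun palabra => (["evitar", "prevenir", "reducir", "minimizar"] : List String).contains palabra) then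
      "te ahorra tiempo, dinero y frustración al identificar y corregir problemas desde el principio"
    else
      "establece un diferencial competitivo que menos del 5% de personas implementa correctamente") =
    pvResp.getD (ws.foldl (fun b palabra => min b (PySem.Dict.getD pvPrio palabra 3)) 3) "" := by
  rw [pv_fold_char ws 3 (le_refl 3)]
  split_ifs <;> rfl

-- ===== VERDICT (by name: the statement is the Claim_ definition above) =====
theorem generar_explicacion_practica_py_spec : Claim_equal_generar_explicacion_practica_py := by
  intro punto _
  unfold Spec_generar_explicacion_practica_py generar_explicacion_practica_py generar_explicacion_practica_py_alt
  by_cases hg : (punto = "" ∨ PySem.Str.len punto < 3)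
  · rw [if_pos hg, if_pos hg]
  · rw [if_neg hg, if_neg hg]
    exact pv_main_aux _
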